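-- pv_equiv track=rewrite | github.com/muhammed-kaya-2016400234/Filelist | filelist.py | duplname
-- ===== SOURCE A (Python) =====
-- def duplname(flist):
--     namelist = []  # stores the duplicate sets
--     uniquenam = 0  # stores the number of unique named files
--     flist = sorted(flist, key=lambda g: g.split("/")[-1])  # sort filepaths with respect to file names
--
--     for i in range(len(flist) - 1):  # checks if the next file has the same name
--         # if it doesn't, seperates them with "-----"
--         currf = flist[i]
--         curr = currf.split("/")[-1]
--         next = flist[i + 1].split("/")[-1]
--         namelist.append(currf)
--         if curr != next:
--             uniquenam += 1
--             namelist.append("-----")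
--
--     if len(flist) != 0:
--         uniquenam += 1
--
--         namelist.append(flist[-1])  # add the last element since it is excluded in for loop above
--
--
--     return (namelist, uniquenam)  # return a tuple containing the filepaths and no of unique named files
-- ===== SOURCE B (Python) =====
-- def duplname(flist):
--     groups = {}
--     for f in flist:
--         groups.setdefault(f.split("/")[-1], []).append(f)
--     namelist = []
--     for name in sorted(groups):
--         if namelist:
--             namelist.append("-----")
--         namelist.extend(groups[name])
--     return (namelist, len(groups))
-- ===== Notes on version B (the rewrite author's own statement) =====
-- stated objective: alternative
-- what changed: Replaces the key-sort of all paths plus adjacent-pair look-ahead scan by a one-pass dict grouping basename -> paths, then emits the groups in sorted-key order with separators between groups; unique count is len(dict).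
import Mathlib
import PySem

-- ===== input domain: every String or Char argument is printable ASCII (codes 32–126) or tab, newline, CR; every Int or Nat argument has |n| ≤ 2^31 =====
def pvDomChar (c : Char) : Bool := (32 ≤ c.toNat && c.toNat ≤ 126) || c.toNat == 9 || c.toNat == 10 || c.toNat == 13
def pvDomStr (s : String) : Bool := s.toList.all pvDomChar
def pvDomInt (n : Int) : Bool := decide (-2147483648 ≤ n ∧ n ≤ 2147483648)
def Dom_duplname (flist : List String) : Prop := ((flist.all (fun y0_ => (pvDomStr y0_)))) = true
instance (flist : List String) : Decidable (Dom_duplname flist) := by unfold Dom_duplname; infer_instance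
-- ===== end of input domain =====

-- B groups paths by basename in a dict and emits the groups in sorted-key order with separators,
-- instead of A's key-sort of all paths plus adjacent-pair look-ahead scan; same return value.

-- shared helper: g.split("/")[-1]  (split("/") is never empty, so the [-1] lookup never raises)
def pvBase (g : String) : String :=
  (PySem.List.pyGet? ((PySem.Str.split? g "/").getD []) (-1)).getD ""

-- ===== PORT A =====
def duplname (flist : List String) : List String × Int :=
  let fl := PySem.List.sorted flist (fun g => pvBase g)
  let st := (PySem.List.pyRange 0 ((fl.length : Int) - 1) 1).foldl
    (fun (st : List String × Int) i =>
      let currf := PySem.List.pyGetD fl i ""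
      let curr := pvBase currf
      let next := pvBase (PySem.List.pyGetD fl (i + 1) "")
      let namelist := st.1 ++ [currf]
      if curr ≠ next then (namelist ++ ["-----"], st.2 + 1) else (namelist, st.2))
    ([], 0)
  if (fl.length : Int) ≠ 0 then (st.1 ++ [PySem.List.pyGetD fl (-1) ""], st.2 + 1) else st

-- ===== PORT B =====
def duplname_alt (flist : List String) : List String × Int :=
  let groups := flist.foldl
    (fun (d : PySem.Dict String (List String)) f => d.modify (pvBase f) [] (fun l => l ++ [f]))
    PySem.Dict.empty
  let namelist := (PySem.List.sorted groups.keys (fun k => k)).foldl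
    (fun (out : List String) name =>
      (if out ≠ [] then out ++ ["-----"] else out) ++ groups.getD name []) []
  (namelist, (groups.size : Int))

-- ===== PRECONDITION & SPEC =====
def Spec_duplname (flist : List String) (out : List String × Int) : Prop := out = duplname_alt flist
instance (flist : List String) (out : List String × Int) : Decidable (Spec_duplname flist out) := by unfold Spec_duplname; infer_instance

-- ===== CLAIM (what is proved, stated in full; the proofs are below) =====
def Claim_equal_duplname : Prop := ∀ (flist : List String), Dom_duplname flist → Spec_duplname flist (duplname flist)

-- ===== LEMMAS AND PROOFS =====

-- the group of paths whose basename is k, in original order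
def pvG (xs : List String) (k : String) : List String := xs.filter (fun f => pvBase f == k)

-- the sorted list of distinct basenames
def pvK (xs : List String) : List String :=
  PySem.List.sorted (PySem.Set.ofList (xs.map pvBase)) (fun k => k)

-- the common output list: groups in key order, separated by "-----"
def pvInterc (xs : List String) : List String → List String
  | [] => []
  | k :: K' => pvG xs k ++ K'.flatMap (fun k => "-----" :: pvG xs k)

-- A's loop body on an adjacent pair
def pvStep (st : List String × Int) (p : String × String) : List String × Int :=
  if pvBase p.1 ≠ pvBase p.2 then ((st.1 ++ [p.1]) ++ ["-----"], st.2 + 1)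
  else (st.1 ++ [p.1], st.2)

-- (1) uniqueness of a stable key-sorted arrangement
theorem pv_stable_unique : ∀ (l₁ l₂ : List String),
    l₁.Pairwise (fun a b => pvBase a ≤ pvBase b) →
    l₂.Pairwise (fun a b => pvBase a ≤ pvBase b) →
    (∀ k, l₁.filter (fun f => pvBase f == k) = l₂.filter (fun f => pvBase f == k)) →
    l₁ = l₂ := by
  intro l₁
  induction l₁ with
  | nil =>
    intro l₂ _ _ hf
    cases l₂ with
    | nil => rfl
    | cons b t₂ =>
      have hb := hf (pvBase b)
      rw [List.filter_nil, List.filter_cons] at hb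
      simp at hb
  | cons a t₁ ih =>
    intro l₂ h₁ h₂ hf
    cases l₂ with
    | nil =>
      have ha := hf (pvBase a)
      rw [List.filter_nil, List.filter_cons] at ha
      simp at ha
    | cons b t₂ =>
      have ha2 : a ∈ b :: t₂ := by
        have h := hf (pvBase a)
        have hmem : a ∈ (b :: t₂).filter (fun f => pvBase f == pvBase a) := by
          rw [← h, List.filter_cons]
          simp
        exact (List.mem_filter.mp hmem).1
      have hb1 : b ∈ a :: t₁ := by
        have h := hf (pvBase b)
        have hmem : b ∈ (a :: t₁).filter (fun f => pvBase f == pvBase b) := by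
          rw [h, List.filter_cons]
          simp
        exact (List.mem_filter.mp hmem).1
      have hab : pvBase a = pvBase b := by
        apply le_antisymm
        · rcases List.mem_cons.mp hb1 with h | h
          · rw [h]
          · exact (List.pairwise_cons.mp h₁).1 b h
        · rcases List.mem_cons.mp ha2 with h | h
          · rw [h]
          · exact (List.pairwise_cons.mp h₂).1 a h
      have hfa := hf (pvBase a)
      rw [List.filter_cons, List.filter_cons] at hfa
      rw [if_pos (by simp), if_pos (by simp [hab.symm])] at hfa
      injection hfa with hhead htail
      subst hhead
      congr 1
      apply ih t₂ (List.Pairwise.of_cons h₁) (List.Pairwise.of_cons h₂)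
      intro k
      by_cases hk : k = pvBase a
      · rw [hk]; exact htail
      · have hc : ¬((fun f => pvBase f == k) a = true) := by
          simp
          exact fun e => hk e.symm
        have h := hf k
        rw [List.filter_cons, List.filter_cons, if_neg hc, if_neg hc] at h
        exact h


-- (2) insertion keeps sortedness
theorem pv_ins_pairwise (acc : List String) (x : String)
    (h : acc.Pairwise (fun a b => pvBase a ≤ pvBase b)) :
    (PySem.List.insertBy (fun a b => decide (pvBase a < pvBase b)) x acc).Pairwise
      (fun a b => pvBase a ≤ pvBase b) := by
  induction acc with
  | nil => simp [PySem.List.insertBy]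
  | cons y ys ih =>
    obtain ⟨hy, hys⟩ := List.pairwise_cons.mp h
    rw [show PySem.List.insertBy (fun a b => decide (pvBase a < pvBase b)) x (y :: ys) =
        if decide (pvBase x < pvBase y) then x :: y :: ys
        else y :: PySem.List.insertBy (fun a b => decide (pvBase a < pvBase b)) x ys
        from rfl]
    by_cases hxy : pvBase x < pvBase y
    · rw [if_pos (by simpa using hxy)]
      refine List.pairwise_cons.mpr ⟨?_, h⟩
      intro z hz
      rcases List.mem_cons.mp hz with h' | h'
      · rw [h']; exact le_of_lt hxy
      · exact le_of_lt (lt_of_lt_of_le hxy (hy z h'))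
    · rw [if_neg (by simpa using hxy)]
      refine List.pairwise_cons.mpr ⟨?_, ih hys⟩
      intro z hz
      rcases (PySem.List.mem_insertBy _ _ _ _).mp hz with h' | h'
      · rw [h']; exact le_of_not_gt hxy
      · exact hy z h'

theorem pv_ins_filter (acc : List String) (x : String) (k₀ : String)
    (h : acc.Pairwise (fun a b => pvBase a ≤ pvBase b)) :
    (PySem.List.insertBy (fun a b => decide (pvBase a < pvBase b)) x acc).filter
        (fun f => pvBase f == k₀) =
      acc.filter (fun f => pvBase f == k₀) ++ (if pvBase x == k₀ then [x] else []) := by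
  induction acc with
  | nil =>
    rw [show PySem.List.insertBy (fun a b => decide (pvBase a < pvBase b)) x [] = [x] from rfl]
    simp [List.filter_cons]
  | cons y ys ih =>
    obtain ⟨hy, hys⟩ := List.pairwise_cons.mp h
    rw [show PySem.List.insertBy (fun a b => decide (pvBase a < pvBase b)) x (y :: ys) =
        if decide (pvBase x < pvBase y) then x :: y :: ys
        else y :: PySem.List.insertBy (fun a b => decide (pvBase a < pvBase b)) x ys
        from rfl]
    by_cases hxy : pvBase x < pvBase y
    · rw [if_pos (by simpa using hxy)]
      by_cases hx : pvBase x == k₀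
      · have hk : pvBase x = k₀ := by simpa using hx
        have hnil : (y :: ys).filter (fun f => pvBase f == k₀) = [] := by
          apply List.filter_eq_nil_iff.mpr
          intro z hz
          have hlt : pvBase x < pvBase z := by
            rcases List.mem_cons.mp hz with h' | h'
            · rw [h']; exact hxy
            · exact lt_of_lt_of_le hxy (hy z h')
          simp
          rw [← hk]
          exact (ne_of_gt hlt)
        rw [List.filter_cons, if_pos hx, hnil, if_pos hx]
        rfl
      · rw [List.filter_cons, if_neg hx, if_neg hx, List.append_nil]
    · rw [if_neg (by simpa using hxy)]
      rw [List.filter_cons, List.filter_cons, ih hys]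
      by_cases hyk : pvBase y == k₀
      · rw [if_pos hyk, if_pos hyk, List.cons_append]
      · rw [if_neg hyk, if_neg hyk]

theorem pv_fold_filter (k₀ : String) : ∀ (l acc : List String),
    acc.Pairwise (fun a b => pvBase a ≤ pvBase b) →
    ((l.foldl (fun acc x =>
        PySem.List.insertBy (fun a b => decide (pvBase a < pvBase b)) x acc) acc).filter
      (fun f => pvBase f == k₀)) =
      acc.filter (fun f => pvBase f == k₀) ++ l.filter (fun f => pvBase f == k₀) := by
  intro l
  induction l with
  | nil => intro acc _; simp
  | cons x l ih =>
    intro acc h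
    rw [List.foldl_cons, ih _ (pv_ins_pairwise acc x h), pv_ins_filter acc x k₀ h,
        List.filter_cons]
    by_cases hx : pvBase x == k₀
    · rw [if_pos hx, if_pos hx]
      simp
    · rw [if_neg hx, if_neg hx, List.append_nil]

theorem pv_sorted_filter_stable (xs : List String) (k₀ : String) :
    (PySem.List.sorted xs (fun g => pvBase g)).filter (fun f => pvBase f == k₀) =
      xs.filter (fun f => pvBase f == k₀) := by
  rw [PySem.List.sorted_eq_foldl_insertBy xs (fun g => pvBase g),
      pv_fold_filter k₀ xs [] (by simp)]
  rfl

-- (3) group facts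
theorem pv_mem_G {xs : List String} {k f : String} (h : f ∈ pvG xs k) : pvBase f = k := by
  simp [pvG, List.mem_filter] at h
  exact h.2

theorem pv_G_ne_nil {xs : List String} {k : String} (h : k ∈ pvK xs) : pvG xs k ≠ [] := by
  rw [pvK, PySem.List.mem_sorted, PySem.Set.mem_ofList, List.mem_map] at h
  obtain ⟨f, hf, hbase⟩ := h
  have : f ∈ pvG xs k := by simp [pvG, List.mem_filter, hf, hbase]
  exact List.ne_nil_of_mem this

theorem pvK_pairwise (xs : List String) : (pvK xs).Pairwise (· < ·) :=
  PySem.List.sorted_ofList_pairwise_lt _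

theorem pvK_nodup (xs : List String) : (pvK xs).Nodup :=
  (PySem.List.sorted_perm _ _ _).symm.nodup (PySem.Set.nodup_ofList _)

theorem pv_flatMap_filter_aux (xs : List String) (k₀ : String) :
    ∀ (K : List String), K.Nodup →
    (K.flatMap (pvG xs)).filter (fun f => pvBase f == k₀) =
      if k₀ ∈ K then pvG xs k₀ else [] := by
  intro K
  induction K with
  | nil => simp
  | cons k K' ih =>
    intro hnd
    rw [List.flatMap_cons, List.filter_append, ih hnd.of_cons]
    by_cases hk : k = k₀
    · subst hk
      have h1 : (pvG xs k).filter (fun f => pvBase f == k) = pvG xs k :=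
        List.filter_eq_self.mpr (fun f hf => by simp [pv_mem_G hf])
      have h2 : k ∉ K' := (List.nodup_cons.mp hnd).1
      simp [h1, h2]
    · have h1 : (pvG xs k).filter (fun f => pvBase f == k₀) = [] :=
        List.filter_eq_nil_iff.mpr (fun f hf => by simp [pv_mem_G hf, hk])
      have hk' : ¬(k₀ = k) := fun e => hk e.symm
      simp [h1, List.mem_cons, hk']

theorem pv_flatMap_filter (xs : List String) (k₀ : String) :
    ((pvK xs).flatMap (pvG xs)).filter (fun f => pvBase f == k₀) =
      xs.filter (fun f => pvBase f == k₀) := by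
  rw [pv_flatMap_filter_aux xs k₀ (pvK xs) (pvK_nodup xs)]
  by_cases h : k₀ ∈ pvK xs
  · rw [if_pos h]
    rfl
  · rw [if_neg h]
    symm
    apply List.filter_eq_nil_iff.mpr
    intro f hf
    simp
    intro he
    apply h
    rw [pvK, PySem.List.mem_sorted, PySem.Set.mem_ofList]
    rw [← he]
    exact List.mem_map_of_mem hf

theorem pv_flatMap_pairwise (xs : List String) :
    ((pvK xs).flatMap (pvG xs)).Pairwise (fun a b => pvBase a ≤ pvBase b) := by
  rw [List.flatMap_def, List.pairwise_flatten]
  constructor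
  · intro l hl
    obtain ⟨k, _, rfl⟩ := List.mem_map.mp hl
    exact List.pairwise_of_forall_mem_list
      (fun a ha b hb => by rw [pv_mem_G ha, pv_mem_G hb])
  · exact List.Pairwise.map _
      (fun k₁ k₂ h a ha b hb => by rw [pv_mem_G ha, pv_mem_G hb]; exact le_of_lt h)
      (pvK_pairwise xs)

-- the decomposition of A's sorted list into the key-ordered groups
theorem pv_sorted_eq_flatMap (xs : List String) :
    PySem.List.sorted xs (fun g => pvBase g) = (pvK xs).flatMap (pvG xs) := by
  apply pv_stable_unique
  · exact PySem.List.sorted_pairwise xs (fun g => pvBase g)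
  · exact pv_flatMap_pairwise xs
  · intro k
    rw [pv_sorted_filter_stable, pv_flatMap_filter]

-- (4) A's loop over indices is the fold of pvStep over adjacent pairs
theorem pv_A_loop (fl : List String) (init : List String × Int) :
    (PySem.List.pyRange 0 ((fl.length : Int) - 1) 1).foldl
      (fun st i => pvStep st (PySem.List.pyGetD fl i "", PySem.List.pyGetD fl (i + 1) ""))
      init = (fl.zip fl.tail).foldl pvStep init := by
  cases fl with
  | nil =>
    rw [show ((List.length ([] : List String) : Int) - 1) = -1 by simp]
    rw [show PySem.List.pyRange 0 (-1) 1 = [] from rfl]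
    rfl
  | cons a fl' =>
    have hzl : ((a :: fl').zip (a :: fl').tail).length = fl'.length := by
      simp [List.length_zip]
    rw [show ((a :: fl').length : Int) - 1 =
        ((((a :: fl').zip (a :: fl').tail).length : Int)) from by
      rw [hzl]; push_cast [List.length_cons]; ring]
    rw [show (PySem.List.pyRange 0 ((((a :: fl').zip (a :: fl').tail).length : Int)) 1).foldl
        (fun st i => pvStep st (PySem.List.pyGetD (a :: fl') i "",
          PySem.List.pyGetD (a :: fl') (i + 1) ""))
        init =
        (PySem.List.pyRange 0 ((((a :: fl').zip (a :: fl').tail).length : Int)) 1).foldl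
        (fun st i => pvStep st (PySem.List.pyGetD ((a :: fl').zip (a :: fl').tail) i ("", "")))
        init from by
      apply PySem.List.foldl_congr_mem
      intro acc i hi
      rw [PySem.List.mem_pyRange_one] at hi
      obtain ⟨h0, h1⟩ := hi
      have h1n : i.toNat < ((a :: fl').zip (a :: fl').tail).length := by omega
      have hifl : i < ((a :: fl').length : Int) := by
        rw [hzl] at h1; simp; omega
      have hifl1 : i + 1 < ((a :: fl').length : Int) := by
        rw [hzl] at h1; simp; omega
      rw [PySem.List.pyGetD_eq_getElem _ _ h0 hifl,
          PySem.List.pyGetD_eq_getElem _ _ (by omega) hifl1,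
          PySem.List.pyGetD_eq_getElem _ _ h0 (by rw [hzl] at h1 ⊢; exact_mod_cast h1)]
      congr 1
      simp [List.getElem_zip, show (i + 1).toNat = i.toNat + 1 from by omega]]
    exact PySem.List.foldl_pyRange_zero_pyGetD' _ ("", "") pvStep init

theorem pv_L_last (k : String) : ∀ (G : List String) (st : List String × Int),
    (∀ f ∈ G, pvBase f = k) →
    (G.zip G.tail).foldl pvStep st = (st.1 ++ G.dropLast, st.2) := by
  intro G
  induction G with
  | nil => intro st _; simp
  | cons x G ih =>
    intro st h
    cases G with
    | nil => simp
    | cons y G' =>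
      have hx : pvBase x = k := h x (by simp)
      have hy : pvBase y = k := h y (by simp)
      rw [show ((x :: y :: G').zip (x :: y :: G').tail) =
            (x, y) :: ((y :: G').zip (y :: G').tail) from rfl, List.foldl_cons]
      rw [show pvStep st (x, y) = (st.1 ++ [x], st.2) from by
        simp [pvStep, hx, hy]]
      rw [ih (st.1 ++ [x], st.2) (fun f hf => h f (List.mem_cons_of_mem _ hf))]
      rw [show (x :: y :: G').dropLast = x :: (y :: G').dropLast from rfl]
      simp

theorem pv_L_group (k r : String) (rest : List String) (hr : pvBase r ≠ k) :
    ∀ (G : List String) (st : List String × Int), G ≠ [] → (∀ f ∈ G, pvBase f = k) →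
    ((G ++ r :: rest).zip (G ++ r :: rest).tail).foldl pvStep st =
      ((r :: rest).zip rest).foldl pvStep (st.1 ++ G ++ ["-----"], st.2 + 1) := by
  intro G
  induction G with
  | nil => intro st h _; exact absurd rfl h
  | cons x G ih =>
    intro st _ hall
    have hx : pvBase x = k := hall x (by simp)
    cases G with
    | nil =>
      rw [show (([x] ++ r :: rest).zip ([x] ++ r :: rest).tail) =
            (x, r) :: ((r :: rest).zip rest) from rfl, List.foldl_cons]
      have hxr : pvBase x ≠ pvBase r := by rw [hx]; exact fun e => hr e.symm
      rw [show pvStep st (x, r) = ((st.1 ++ [x]) ++ ["-----"], st.2 + 1) from by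
        simp [pvStep, hxr]]
    | cons y G' =>
      have hy : pvBase y = k := hall y (by simp)
      rw [show (((x :: y :: G') ++ r :: rest).zip ((x :: y :: G') ++ r :: rest).tail) =
            (x, y) :: (((y :: G') ++ r :: rest).zip ((y :: G') ++ r :: rest).tail)
            from rfl, List.foldl_cons]
      rw [show pvStep st (x, y) = (st.1 ++ [x], st.2) from by
        simp [pvStep, hx, hy]]
      rw [ih (st.1 ++ [x], st.2) (by simp) (fun f hf => hall f (List.mem_cons_of_mem _ hf))]
      simp [List.append_assoc]

theorem pv_interc_cons (xs : List String) (k : String) {K' : List String} (h : K' ≠ []) :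
    pvInterc xs (k :: K') = pvG xs k ++ "-----" :: pvInterc xs K' := by
  cases K' with
  | nil => exact absurd rfl h
  | cons k' K'' => simp [pvInterc, List.flatMap_cons]

theorem pv_dropLast_concat : ∀ (G : List String), G ≠ [] →
    G.dropLast ++ [G.getLast?.getD ""] = G := by
  intro G
  induction G with
  | nil => intro h; exact absurd rfl h
  | cons x G ih =>
    intro _
    cases G with
    | nil => rfl
    | cons y G' =>
      have h' := ih (by simp)
      rw [show (x :: y :: G').dropLast = x :: (y :: G').dropLast from rfl,
          List.getLast?_cons_cons, List.cons_append, h']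

theorem pv_L_main (xs : List String) : ∀ (K : List String) (st : List String × Int),
    K.Pairwise (· < ·) →
    (∀ k ∈ K, pvG xs k ≠ []) → K ≠ [] →
    (((K.flatMap (pvG xs)).zip (K.flatMap (pvG xs)).tail).foldl pvStep st).1
        ++ [(K.flatMap (pvG xs)).getLast?.getD ""] = st.1 ++ pvInterc xs K ∧
    (((K.flatMap (pvG xs)).zip (K.flatMap (pvG xs)).tail).foldl pvStep st).2 =
      st.2 + (K.length : Int) - 1 := by
  intro K
  induction K with
  | nil => intro st _ _ h; exact absurd rfl h
  | cons k K' ih =>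
    intro st hpw hne _
    cases K' with
    | nil =>
      simp only [List.flatMap_cons, List.flatMap_nil, List.append_nil]
      rw [pv_L_last k (pvG xs k) st (fun f hf => pv_mem_G hf)]
      have hGne : pvG xs k ≠ [] := hne k (by simp)
      constructor
      · rw [List.append_assoc, pv_dropLast_concat _ hGne]
        simp [pvInterc]
      · simp
    | cons k' K'' =>
      have hfne : (k' :: K'').flatMap (pvG xs) ≠ [] := by
        have h1 : pvG xs k' ≠ [] := hne k' (by simp)
        simp only [List.flatMap_cons]
        intro hx
        exact h1 (List.append_eq_nil_iff.mp hx).1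
      obtain ⟨r, rest, heq⟩ := List.exists_cons_of_ne_nil hfne
      have hr : pvBase r ≠ k := by
        have hrmem : r ∈ (k' :: K'').flatMap (pvG xs) := by rw [heq]; simp
        obtain ⟨k₀, hk₀, hrG⟩ := List.mem_flatMap.mp hrmem
        rw [pv_mem_G hrG]
        have : k < k₀ := (List.pairwise_cons.mp hpw).1 k₀ hk₀
        exact (ne_of_gt this)
      have hL : (k :: k' :: K'').flatMap (pvG xs) = pvG xs k ++ r :: rest := by
        rw [List.flatMap_cons, heq]
      rw [hL]
      rw [pv_L_group k r rest hr (pvG xs k) st (hne k (by simp)) (fun f hf => pv_mem_G hf)]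
      have ihm := ih (st.1 ++ pvG xs k ++ ["-----"], st.2 + 1)
        (List.Pairwise.of_cons hpw) (fun k₁ h₁ => hne k₁ (List.mem_cons_of_mem _ h₁))
        (by simp)
      rw [heq] at ihm
      obtain ⟨ih1, ih2⟩ := ihm
      constructor
      · rw [show ((r :: rest).zip rest) = ((r :: rest).zip (r :: rest).tail) from rfl]
        rw [List.getLast?_append_of_ne_nil _ (by simp), ih1,
            pv_interc_cons xs k (by simp)]
        simp
      · rw [show ((r :: rest).zip rest) = ((r :: rest).zip (r :: rest).tail) from rfl, ih2]
        simp only [List.length_cons]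
        push_cast
        ring

theorem pv_A_char (flist : List String) :
    duplname flist = (pvInterc flist (pvK flist), ((pvK flist).length : Int)) := by
  have hA : duplname flist =
      (let fl := PySem.List.sorted flist (fun g => pvBase g)
       let st := (PySem.List.pyRange 0 ((fl.length : Int) - 1) 1).foldl
         (fun st i => pvStep st (PySem.List.pyGetD fl i "", PySem.List.pyGetD fl (i + 1) ""))
         ([], 0)
       if (fl.length : Int) ≠ 0 then (st.1 ++ [PySem.List.pyGetD fl (-1) ""], st.2 + 1)
       else st) := rfl
  rw [hA]
  by_cases h : flist = []
  · subst h; rfl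
  · simp only []
    rw [pv_A_loop, pv_sorted_eq_flatMap]
    have hfl : (pvK flist).flatMap (pvG flist) ≠ [] := by
      rw [← pv_sorted_eq_flatMap, Ne, PySem.List.sorted_eq_nil_iff]
      exact h
    have hK : pvK flist ≠ [] := by
      intro hk
      apply hfl
      rw [hk]
      rfl
    obtain ⟨m1, m2⟩ := pv_L_main flist (pvK flist) ([], 0) (pvK_pairwise flist)
      (fun k hk => pv_G_ne_nil hk) hK
    rw [if_pos (by
      simp only [ne_eq, Nat.cast_eq_zero, List.length_eq_zero_iff]
      exact hfl)]
    rw [PySem.List.pyGetD_neg_one _ _ hfl]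
    rw [show ((pvK flist).flatMap (pvG flist)).getLast hfl =
        ((pvK flist).flatMap (pvG flist)).getLast?.getD "" from by
      rw [List.getLast?_eq_getLast hfl]; rfl]
    refine Prod.ext ?_ ?_
    · simpa using m1
    · simp only []
      rw [m2]
      push_cast
      ring

-- (5) B's computation
theorem pv_groups_getD (flist : List String) (k : String) :
    (flist.foldl
      (fun (d : PySem.Dict String (List String)) f => d.modify (pvBase f) [] (fun l => l ++ [f]))
      PySem.Dict.empty).getD k [] = pvG flist k := by
  rw [show flist.foldl
      (fun (d : PySem.Dict String (List String)) f => d.modify (pvBase f) [] (fun l => l ++ [f]))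
      PySem.Dict.empty =
      (flist.map (fun f => (pvBase f, f))).foldl
        (fun (d : PySem.Dict String (List String)) p => d.modify p.1 [] (fun l => l ++ [p.2]))
        PySem.Dict.empty from by rw [List.foldl_map]]
  rw [PySem.Dict.getD_foldl_modify_append]
  simp [pvG, List.filter_map, List.map_map, Function.comp_def]

theorem pv_groups_keys (flist : List String) :
    (flist.foldl
      (fun (d : PySem.Dict String (List String)) f => d.modify (pvBase f) [] (fun l => l ++ [f]))
      PySem.Dict.empty).keys = PySem.Set.ofList (flist.map pvBase) := by
  rw [PySem.Dict.keys_foldl_modify_key flist pvBase [] (fun _ f => fun l => l ++ [f])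
      PySem.Dict.empty]
  rfl

theorem pv_B_loop (xs : List String) : ∀ (K : List String) (acc : List String), acc ≠ [] →
    K.foldl (fun out k => (if out ≠ [] then out ++ ["-----"] else out) ++ pvG xs k) acc =
      acc ++ K.flatMap (fun k => "-----" :: pvG xs k) := by
  intro K
  induction K with
  | nil => intro acc h; simp
  | cons k K' ih =>
    intro acc h
    rw [List.foldl_cons, if_pos h, ih _ (by simp [h])]
    simp [List.flatMap_cons, List.append_assoc]

theorem pv_B_char (flist : List String) :
    duplname_alt flist = (pvInterc flist (pvK flist), ((pvK flist).length : Int)) := by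
  simp only [duplname_alt]
  rw [pv_groups_keys]
  have hsize : (flist.foldl
      (fun (d : PySem.Dict String (List String)) f => d.modify (pvBase f) [] (fun l => l ++ [f]))
      PySem.Dict.empty).size = (pvK flist).length := by
    rw [show ∀ (d : PySem.Dict String (List String)), d.size = d.keys.length from
      fun d => (List.length_map _).symm]
    rw [pv_groups_keys, pvK, PySem.List.length_sorted]
  rw [hsize]
  have hbody : (PySem.List.sorted (PySem.Set.ofList (flist.map pvBase)) (fun k => k)).foldl
      (fun (out : List String) name => (if out ≠ [] then out ++ ["-----"] else out) ++
        (flist.foldl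
          (fun (d : PySem.Dict String (List String)) f => d.modify (pvBase f) [] (fun l => l ++ [f]))
          PySem.Dict.empty).getD name []) [] =
      (pvK flist).foldl
        (fun (out : List String) name => (if out ≠ [] then out ++ ["-----"] else out) ++
          pvG flist name) [] := by
    rw [show PySem.List.sorted (PySem.Set.ofList (flist.map pvBase)) (fun k => k) = pvK flist
        from rfl]
    apply PySem.List.foldl_congr_mem
    intro acc name _
    rw [pv_groups_getD]
  rw [hbody]
  cases hK : pvK flist with
  | nil => simp [pvInterc]
  | cons k K' =>
    have hkmem : k ∈ pvK flist := by rw [hK]; exact List.mem_cons_self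
    rw [List.foldl_cons, if_neg (by simp), List.nil_append,
        pv_B_loop flist K' _ (pv_G_ne_nil hkmem)]
    rfl

-- ===== VERDICT (by name: the statement is the Claim_ definition above) =====
theorem duplname_spec : Claim_equal_duplname := by
  intro flist _
  unfold Spec_duplname
  rw [pv_A_char, pv_B_char]
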